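-- pv_equiv track=rewrite | github.com/atsheikh/bioinformatics | bio-lib.py | DistanceBetweenPatternAndStrings
-- ===== SOURCE A (Python) =====
-- def Text (i, k, DNA):
-- 	return DNA[i:i+k]
--
-- def HammingDistance(p, q):
--
-- 	dist = 0
--
-- 	for i in range (0, len(p)):
-- 		if p[i] != q[i]:
-- 			dist = dist + 1
--
-- 	return dist
--
-- def DistanceBetweenPatternAndStrings(PATTERN, DNA):
-- 	k = len(PATTERN)
-- 	distance = 0
--
-- 	for string in DNA:
-- 		hammingDistance = 100000000;
-- 		for i in range(0, len(string)-len(PATTERN)+1):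
-- 			PATTERN_BAR = Text(i, k, string)
-- 			HD = HammingDistance(PATTERN, PATTERN_BAR)
--
-- 			if hammingDistance > HD:
-- 				hammingDistance = HD
--
-- 		distance = distance + hammingDistance
--
-- 	return distance
-- ===== SOURCE B (Python) =====
-- def DistanceBetweenPatternAndStrings(PATTERN, DNA):
--     # Pattern-major: build the whole mismatch vector over all windows by folding
--     # the pattern one character at a time (a zip per pattern position), then take
--     # its minimum; 100000000 is the function's "no window" ceiling, kept in the
--     # candidate set so it also bounds the result, exactly as in the original.
--     k = len(PATTERN)
--     total = 0
--     for s in DNA: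
--         w = len(s) - k + 1
--         mism = [0] * w
--         for j, c in enumerate(PATTERN):
--             mism = [m + (c != d) for m, d in zip(mism, s[j:j + w])]
--         total += min(mism + [100000000])
--     return total
-- ===== Notes on version B (the rewrite author's own statement) =====
-- stated objective: alternative
-- what changed: A scans each window of each string and recounts its Hamming distance from scratch (window-major, with an explicit index loop per window); B sweeps the pattern once (pattern-major), updating the whole per-window mismatch vector with one zip per pattern position, and takes the vector's minimum.
import Mathlib
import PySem

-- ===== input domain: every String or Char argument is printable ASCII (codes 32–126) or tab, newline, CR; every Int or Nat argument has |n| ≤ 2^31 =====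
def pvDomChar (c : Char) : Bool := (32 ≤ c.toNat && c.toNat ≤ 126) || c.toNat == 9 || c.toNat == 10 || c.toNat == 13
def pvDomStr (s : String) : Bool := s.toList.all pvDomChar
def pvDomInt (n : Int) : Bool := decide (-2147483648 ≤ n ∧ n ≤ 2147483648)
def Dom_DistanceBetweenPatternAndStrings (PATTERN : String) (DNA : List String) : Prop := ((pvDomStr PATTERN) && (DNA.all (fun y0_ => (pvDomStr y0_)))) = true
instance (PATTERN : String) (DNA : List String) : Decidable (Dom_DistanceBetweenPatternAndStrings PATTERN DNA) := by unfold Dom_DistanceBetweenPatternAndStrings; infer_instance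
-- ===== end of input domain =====

-- B replaces A's window-by-window rescan with a pattern-major sweep that builds the whole
-- mismatch vector (one zip per pattern position) and takes its minimum: an alternative
-- traversal of the same data, proved to return exactly A's value.


-- ===== PORT A =====
-- Text(i, k, DNA) = DNA[i:i+k]
def pvText (i k : Int) (DNA : List Char) : List Char :=
  PySem.List.slice DNA (some i) (some (i + k))

-- HammingDistance(p, q); p[i]/q[i] ported with pyGetD — exact here: every call in A
-- passes q of length len(p), so the index is always in range.
def pvHammingDistance (p q : List Char) : Int :=
  (PySem.List.pyRange 0 (p.length : Int) 1).foldl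
    (fun dist i =>
      if PySem.List.pyGetD p i ' ' ≠ PySem.List.pyGetD q i ' ' then dist + 1 else dist) 0

def DistanceBetweenPatternAndStrings (PATTERN : String) (DNA : List String) : Int :=
  let k : Int := (PATTERN.toList.length : Int)
  DNA.foldl
    (fun distance string =>
      let s := string.toList
      let hammingDistance :=
        (PySem.List.pyRange 0 ((s.length : Int) - (PATTERN.toList.length : Int) + 1) 1).foldl
          (fun h i =>
            let PATTERN_BAR := pvText i k s
            let HD := pvHammingDistance PATTERN.toList PATTERN_BAR
            if h > HD then HD else h) 100000000
      distance + hammingDistance) 0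

-- ===== PORT B =====
-- per-string body of B's loop (Source B's loop body, extracted as a helper)
def pvAltString (P s : List Char) : Int :=
  let k : Int := (P.length : Int)
  let w : Int := (s.length : Int) - k + 1
  let mism :=
    (PySem.List.enumerate P 0).foldl
      (fun m jc =>
        (m.zip (PySem.List.slice s (some jc.1) (some (jc.1 + w)))).map
          (fun md => md.1 + (if jc.2 ≠ md.2 then (1 : Int) else 0)))
      (PySem.List.pyRepeat [(0 : Int)] w)
  (PySem.List.min? (mism ++ [100000000]) (fun x => x)).getD 0

def DistanceBetweenPatternAndStrings_alt (PATTERN : String) (DNA : List String) : Int :=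
  DNA.foldl (fun total string => total + pvAltString PATTERN.toList string.toList) 0

-- ===== PRECONDITION & SPEC =====
def Spec_DistanceBetweenPatternAndStrings (PATTERN : String) (DNA : List String) (out : Int) : Prop := out = DistanceBetweenPatternAndStrings_alt PATTERN DNA
instance (PATTERN : String) (DNA : List String) (out : Int) : Decidable (Spec_DistanceBetweenPatternAndStrings PATTERN DNA out) := by unfold Spec_DistanceBetweenPatternAndStrings; infer_instance

-- ===== CLAIM (what is proved, stated in full; the proofs are below) =====
def Claim_equal_DistanceBetweenPatternAndStrings : Prop := ∀ (PATTERN : String) (DNA : List String), Dom_DistanceBetweenPatternAndStrings PATTERN DNA → Spec_DistanceBetweenPatternAndStrings PATTERN DNA (DistanceBetweenPatternAndStrings PATTERN DNA)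

-- ===== LEMMAS AND PROOFS =====

-- mismatch count of pattern tail P' (whose first char sits at pattern index j) against
-- the window of s starting at i
def pvMsum (s : List Char) : List Char → Nat → Nat → Int
  | [], _, _ => 0
  | c :: rest, j, i => (if c ≠ s.getD (j + i) ' ' then 1 else 0) + pvMsum s rest (j + 1) i

theorem pv_slice_window (s : List Char) (j wN : Nat) (h : j + wN ≤ s.length) :
    PySem.List.slice s (some (j : Int)) (some ((j : Int) + (wN : Int)))
      = (List.range wN).map (fun i => s.getD (j + i) ' ') := by
  rw [PySem.List.slice_natCast_add]
  apply List.ext_getElem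
  · simp; omega
  · intro i h1 h2
    simp only [List.getElem_take, List.getElem_drop, List.getElem_map, List.getElem_range]
    rw [List.getD_eq_getElem s ' ' (by simp at h1; omega)]

theorem pv_enum_fold (s : List Char) (wN : Nat) :
    ∀ (P' : List Char) (j : Nat) (g : Nat → Int), j + P'.length + wN ≤ s.length + 1 →
      (PySem.List.enumerate P' (j : Int)).foldl
        (fun m jc =>
          (m.zip (PySem.List.slice s (some jc.1) (some (jc.1 + (wN : Int))))).map
            (fun md => md.1 + (if jc.2 ≠ md.2 then (1 : Int) else 0)))
        ((List.range wN).map g)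
      = (List.range wN).map (fun i => g i + pvMsum s P' j i) := by
  intro P'
  induction P' with
  | nil =>
    intro j g _
    rw [PySem.List.enumerate_nil, List.foldl_nil]
    apply List.map_congr_left
    intro i _
    simp [pvMsum]
  | cons c rest ih =>
    intro j g h
    simp only [List.length_cons] at h
    rw [PySem.List.enumerate_cons, List.foldl_cons]
    have hw : j + wN ≤ s.length := by omega
    rw [pv_slice_window s j wN hw, List.zip_map', List.map_map]
    have hcast : ((j : Int) + 1) = ((j + 1 : Nat) : Int) := by push_cast; ring
    rw [hcast]
    have step :
        ((fun md : Int × Char => md.1 + (if c ≠ md.2 then (1 : Int) else 0)) ∘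
            fun a => (g a, s.getD (j + a) ' '))
          = fun i => g i + (if c ≠ s.getD (j + i) ' ' then (1 : Int) else 0) := by
      funext i; simp
    rw [step, ih (j + 1) _ (by omega)]
    apply List.map_congr_left
    intro i _
    simp only [pvMsum]
    ring

theorem pv_fold_nil (s : List Char) (w : Int) (P' : List (Int × Char)) :
    P'.foldl
      (fun (m : List Int) jc =>
        (m.zip (PySem.List.slice s (some (Prod.fst jc)) (some (jc.1 + w)))).map
          (fun md => md.1 + (if (Prod.snd jc) ≠ md.2 then (1 : Int) else 0)))
      ([] : List Int) = [] := by
  induction P' with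
  | nil => rfl
  | cons p rest ih => simpa using ih

theorem pv_msum_eq (s : List Char) :
    ∀ (P' : List Char) (j i : Nat),
      pvMsum s P' j i
        = ((List.range P'.length).map
            (fun t => if P'.getD t ' ' ≠ s.getD (j + t + i) ' ' then (1 : Int) else 0)).sum := by
  intro P'
  induction P' with
  | nil => intro j i; simp [pvMsum]
  | cons c rest ih =>
    intro j i
    rw [List.length_cons, List.range_succ_eq_map]
    simp only [List.map_cons, List.map_map, List.sum_cons, List.getD_cons_zero, pvMsum]
    rw [ih (j + 1) i]
    congr 1
    refine congrArg List.sum (List.map_congr_left ?_)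
    intro t _
    simp only [Function.comp_apply, List.getD_cons_succ]
    have : j + 1 + t + i = j + Nat.succ t + i := by omega
    rw [this]

theorem pv_foldl_range_ite (cond : Nat → Prop) [DecidablePred cond] :
    ∀ (m : Nat) (a : Int),
      (List.range m).foldl (fun d j => if cond j then d + 1 else d) a
        = a + ((List.range m).map (fun j => if cond j then (1 : Int) else 0)).sum := by
  intro m
  induction m with
  | zero => intro a; simp
  | succ m ih =>
    intro a
    rw [List.range_succ, List.foldl_append, List.map_append, List.sum_append, ih a]
    simp only [List.foldl_cons, List.foldl_nil, List.map_cons, List.map_nil, List.sum_cons,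
      List.sum_nil]
    split_ifs <;> ring

theorem pv_hamming_window (P s : List Char) (i : Nat) (h : i + P.length ≤ s.length) :
    pvHammingDistance P ((s.drop i).take P.length) = pvMsum s P 0 i := by
  unfold pvHammingDistance
  rw [PySem.List.pyRange_zero_natCast, List.foldl_map]
  simp only [PySem.List.pyGetD_natCast]
  rw [pv_foldl_range_ite
      (fun j => P.getD j ' ' ≠ ((s.drop i).take P.length).getD j ' ') P.length 0]
  rw [pv_msum_eq]
  rw [zero_add]
  apply congrArg
  apply List.map_congr_left
  intro t ht
  simp only [List.mem_range] at ht
  have hwin : ((s.drop i).take P.length).getD t ' ' = s.getD (0 + t + i) ' ' := by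
    rw [List.getD_eq_getElem _ ' ' (by simp; omega)]
    simp only [List.getElem_take, List.getElem_drop]
    rw [List.getD_eq_getElem s ' ' (by omega)]
    congr 1
    omega
  rw [hwin]

theorem pv_min_append (L : List Int) (c : Int) :
    (PySem.List.min? (L ++ [c]) (fun x => x)).getD 0 = L.foldl min c := by
  cases L with
  | nil => simp [PySem.List.min?_id_cons]
  | cons x t =>
    rw [List.cons_append, PySem.List.min?_id_cons, Option.getD_some, List.foldl_append,
      List.foldl_cons, List.foldl_nil, List.foldl_cons]
    rw [List.foldl_assoc]
    exact min_comm _ _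

theorem pv_inner_eq (P s : List Char) :
    (PySem.List.pyRange 0 ((s.length : Int) - (P.length : Int) + 1) 1).foldl
      (fun h i =>
        let PATTERN_BAR := pvText i (P.length : Int) s
        let HD := pvHammingDistance P PATTERN_BAR
        if h > HD then HD else h) 100000000
    = pvAltString P s := by
  simp only [pvAltString, pvText]
  by_cases hw : (s.length : Int) - (P.length : Int) + 1 ≤ 0
  · rw [PySem.List.pyRange_one_eq_nil hw, List.foldl_nil]
    have h0 : PySem.List.pyRepeat [(0 : Int)] ((s.length : Int) - (P.length : Int) + 1) = [] := by
      rw [PySem.List.pyRepeat_singleton, Int.toNat_of_nonpos hw, List.replicate_zero]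
    rw [h0, pv_fold_nil, List.nil_append]
    have := pv_min_append [] (100000000 : Int)
    simp only [List.nil_append] at this
    rw [this, List.foldl_nil]
  · push Not at hw
    set wN := ((s.length : Int) - (P.length : Int) + 1).toNat with hwN
    have hcast : (s.length : Int) - (P.length : Int) + 1 = (wN : Int) := by omega
    have hk : P.length + wN = s.length + 1 := by omega
    rw [hcast]
    rw [PySem.List.pyRange_zero_natCast, List.foldl_map]
    have hstep : ∀ (h : Int), ∀ iN ∈ List.range wN,
        (let PATTERN_BAR := PySem.List.slice s (some (iN : Int)) (some ((iN : Int) + (P.length : Int)))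
         let HD := pvHammingDistance P PATTERN_BAR
         if h > HD then HD else h) = min h (pvMsum s P 0 iN) := by
      intro h iN hmem
      simp only [List.mem_range] at hmem
      have hik : iN + P.length ≤ s.length := by omega
      simp only
      rw [PySem.List.slice_natCast_add, pv_hamming_window P s iN hik, min_def]
      split_ifs <;> omega
    rw [PySem.List.foldl_congr_mem (List.range wN) _ _ 100000000 hstep]
    rw [PySem.List.pyRepeat_singleton]
    have hrep : List.replicate ((wN : Int)).toNat (0 : Int) = (List.range wN).map (fun _ => (0 : Int)) := by
      simp
    rw [hrep]
    have hef := pv_enum_fold s wN P 0 (fun _ => (0 : Int)) (by omega)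
    simp only [Nat.cast_zero] at hef
    rw [hef, pv_min_append]
    rw [List.foldl_map]
    apply PySem.List.foldl_congr_mem
    intro acc x _
    rw [zero_add]

-- ===== VERDICT (by name: the statement is the Claim_ definition above) =====
theorem DistanceBetweenPatternAndStrings_spec : Claim_equal_DistanceBetweenPatternAndStrings := by
  intro PATTERN DNA _
  unfold Spec_DistanceBetweenPatternAndStrings DistanceBetweenPatternAndStrings DistanceBetweenPatternAndStrings_alt
  simp only []
  congr 1
  funext distance string
  rw [pv_inner_eq PATTERN.toList string.toList]
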